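-- pv_equiv track=rewrite | github.com/rljockin/cv_automation | src/extraction/parsers/generic_cv_parser.py | _parse_software_skills_direct
-- ===== SOURCE A (Python) =====
-- from typing import Dict, List, Optional, Tuple, Any
--
-- def _parse_software_skills_direct(text: str) -> List[str]:
--     """Direct parsing of software skills from SOFTWARE section"""
--     skills = []
--
--     # Look for "SOFTWARE" section specifically
--     software_start = text.find("SOFTWARE")
--     if software_start != -1:
--         # Find the end of the SOFTWARE section (end of text or next major section)
--         software_end = len(text)
--
--         # Get the SOFTWARE section content
--         software_content = text[software_start:software_end]
--
--         # Parse software skills from the content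
--         # Pattern: "Software Name: level" or "Software Name: level. Software Name: level"
--         lines = software_content.split('\n')
--
--         for line in lines:
--             line = line.strip()
--             if not line or line == "SOFTWARE":
--                 continue
--
--             # Split by periods to get individual software entries
--             software_entries = line.split('.')
--
--             for entry in software_entries:
--                 entry = entry.strip()
--                 if ':' in entry:
--                     # Split by colon to get software name and level
--                     parts = entry.split(':', 1)
--                     if len(parts) == 2:
--                         software_name = parts[0].strip()
--                         level = parts[1].strip()
--
--                         # Clean up software name
--                         software_name = software_name.replace('MS-', 'MS ')
--                         software_name = software_name.replace('MS ', 'Microsoft ')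
--
--                         if software_name and len(software_name) > 1:
--                             skills.append(software_name)
--
--     return skills
-- ===== SOURCE B (Python) =====
-- def _parse_software_skills_direct(text: str):
--     """Single-pass character state machine: instead of nested split loops,
--     scan once from the first 'SOFTWARE', accumulating the pre-colon name of
--     the current entry and a seen-colon flag; a '.' or '\n' (plus one virtual
--     trailing '\n') flushes the entry."""
--     start = text.find("SOFTWARE")
--     if start == -1:
--         return []
--     skills = []
--     name_chars = []
--     seen_colon = False
--     for c in text[start:] + '\n':
--         if c == '.' or c == '\n':
--             if seen_colon:
--                 name = ''.join(name_chars).strip()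
--                 name = name.replace('MS-', 'MS ').replace('MS ', 'Microsoft ')
--                 if len(name) > 1:
--                     skills.append(name)
--             name_chars = []
--             seen_colon = False
--         elif not seen_colon:
--             if c == ':':
--                 seen_colon = True
--             else:
--                 name_chars.append(c)
--     return skills
-- ===== Notes on version B (the rewrite author's own statement) =====
-- stated objective: alternative
-- what changed: Replaces A's nested split loops (split lines on '\n', each line on '.', each entry on ':') by a single-pass character state machine: one scan over the suffix after 'SOFTWARE' keeps the pre-colon name buffer and a seen-colon flag, and a '.'/'\n' (plus one virtual trailing '\n') flushes the cleaned name.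
import Mathlib
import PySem

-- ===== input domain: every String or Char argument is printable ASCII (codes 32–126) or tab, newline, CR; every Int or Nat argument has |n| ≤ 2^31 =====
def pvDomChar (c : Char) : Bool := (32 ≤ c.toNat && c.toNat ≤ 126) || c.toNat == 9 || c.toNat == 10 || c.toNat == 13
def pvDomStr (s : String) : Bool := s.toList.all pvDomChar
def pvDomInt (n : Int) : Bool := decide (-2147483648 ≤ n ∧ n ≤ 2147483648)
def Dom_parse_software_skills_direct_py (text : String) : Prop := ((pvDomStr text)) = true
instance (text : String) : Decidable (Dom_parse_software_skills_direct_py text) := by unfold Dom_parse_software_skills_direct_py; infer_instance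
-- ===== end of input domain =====

-- B replaces A's nested line/period/colon split loops by a single-pass character
-- state machine (name buffer + seen-colon flag, flushed at '.'/'\n'); same cost, different algorithm.

-- ===== PORT A =====
-- literal transliteration of _parse_software_skills_direct (on code-point lists via PySem.Chars)
def parse_software_skills_direct_py (text : String) : List String :=
  let s := text.toList
  let skills : List (List Char) := []
  let softwareStart := PySem.Chars.find s "SOFTWARE".toList
  let skills :=
    if softwareStart != -1 then
      let softwareEnd : Int := PySem.Chars.len s
      let softwareContent := PySem.Chars.slice s (some softwareStart) (some softwareEnd)
      let lines := PySem.Chars.splitOn softwareContent ['\n']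
      lines.foldl (fun skills line =>
        let line := PySem.Chars.strip line
        if line.isEmpty || line == "SOFTWARE".toList then skills
        else
          let softwareEntries := PySem.Chars.splitOn line ['.']
          softwareEntries.foldl (fun skills entry =>
            let entry := PySem.Chars.strip entry
            if PySem.Chars.isIn [':'] entry then
              -- parts = entry.split(':', 1); if len(parts) == 2: name, level = parts
              match PySem.Chars.splitOnMax entry [':'] 1 with
              | [part0, part1] =>
                let softwareName := PySem.Chars.strip part0
                let _level := PySem.Chars.strip part1
                let softwareName := PySem.Chars.replace softwareName "MS-".toList "MS ".toList
                let softwareName := PySem.Chars.replace softwareName "MS ".toList "Microsoft ".toList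
                if softwareName ≠ [] ∧ softwareName.length > 1 then skills ++ [softwareName]
                else skills
              | _ => skills
            else skills) skills) skills
    else skills
  skills.map String.ofList

-- ===== PORT B =====
-- B's loop body: one character of the state machine (state = skills, name buffer, seen-colon flag)
def pvStepB (st : List (List Char) × List Char × Bool) (c : Char) :
    List (List Char) × List Char × Bool :=
  match st with
  | (skills, buf, flag) =>
    if c == '.' || c == '\n' then
      (skills ++
        (if flag then
          let name := PySem.Chars.strip buf
          let name := PySem.Chars.replace (PySem.Chars.replace name "MS-".toList "MS ".toList)
                        "MS ".toList "Microsoft ".toList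
          if name.length > 1 then [name] else []
        else []), [], false)
    else if !flag then
      (if c == ':' then (skills, buf, true) else (skills, buf ++ [c], flag))
    else (skills, buf, flag)

-- literal transliteration of implementation B (Source B)
def parse_software_skills_direct_py_alt (text : String) : List String :=
  let s := text.toList
  let start := PySem.Chars.find s "SOFTWARE".toList
  if start == -1 then []
  else
    let st := (PySem.Chars.slice s (some start) none ++ ['\n']).foldl pvStepB ([], [], false)
    st.1.map String.ofList

-- ===== PRECONDITION & SPEC =====
def Spec_parse_software_skills_direct_py (text : String) (out : List String) : Prop := out = parse_software_skills_direct_py_alt text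
instance (text : String) (out : List String) : Decidable (Spec_parse_software_skills_direct_py text out) := by unfold Spec_parse_software_skills_direct_py; infer_instance

-- ===== CLAIM (what is proved, stated in full; the proofs are below) =====
def Claim_equal_parse_software_skills_direct_py : Prop := ∀ (text : String), Dom_parse_software_skills_direct_py text → Spec_parse_software_skills_direct_py text (parse_software_skills_direct_py text)

-- ===== LEMMAS AND PROOFS =====

-- the entry delimiters of the flattened view
def pvDelim (c : Char) : Bool := c == '.' || c == '\n'

-- the two name-cleaning replacements shared by both programs
def pvClean (n : List Char) : List Char :=
  PySem.Chars.replace (PySem.Chars.replace n "MS-".toList "MS ".toList) "MS ".toList "Microsoft ".toList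

-- B's flush of a finished name buffer
def pvEmit (b : List Char) : List (List Char) :=
  let n := pvClean (PySem.Chars.strip b)
  if 1 < n.length then [n] else []

-- contribution of the rest e of the current entry, given the incoming state (buf, flag)
def pvSegOut (buf : List Char) (flag : Bool) (e : List Char) : List (List Char) :=
  if flag then pvEmit buf
  else if ':' ∈ e then pvEmit (buf ++ e.takeWhile (· != ':')) else []

-- what one period/newline-delimited entry contributes to the output
def pvEntryOut (e : List Char) : List (List Char) :=
  if ':' ∈ e then
    let n := pvClean (PySem.Chars.strip (e.takeWhile (· != ':')))
    if 1 < n.length then [n] else []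
  else []

-- what one newline-delimited line contributes
def pvLineOut (l : List Char) : List (List Char) :=
  (List.splitOnP (· == '.') l).flatMap pvEntryOut

-- modify the last element (own def to control equations)
def pvModLast {α : Type} (f : α → α) : List α → List α
  | [] => []
  | [x] => [f x]
  | x :: y :: t => x :: pvModLast f (y :: t)

theorem pvModLast_cons {α : Type} (f : α → α) (x : α) (xs : List α) (h : xs ≠ []) :
    pvModLast f (x :: xs) = x :: pvModLast f xs := by
  cases xs with
  | nil => exact absurd rfl h
  | cons y t => rfl

theorem pvModLast_ne_nil {α : Type} (f : α → α) (L : List α) (h : L ≠ []) :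
    pvModLast f L ≠ [] := by
  cases L with
  | nil => exact absurd rfl h
  | cons x xs => cases xs <;> simp [pvModLast]

-- [c] is an infix iff c is a member
theorem pv_singleton_infix {c : Char} {l : List Char} : [c] <:+: l ↔ c ∈ l := by
  constructor
  · intro h; exact List.singleton_sublist.mp h.sublist
  · intro h
    obtain ⟨s, t, rfl⟩ := List.append_of_mem h
    exact ⟨s, t, by simp⟩

theorem pv_isIn_single (c : Char) (s : List Char) :
    PySem.Chars.isIn [c] s = decide (c ∈ s) := by
  by_cases h : c ∈ s
  · simp [h, PySem.Chars.isIn_iff_infix, pv_singleton_infix]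
  · simp only [h, decide_false]
    exact (PySem.Chars.isIn_eq_false_iff _ _).mpr (fun hin => h (pv_singleton_infix.mp hin))

-- PySem splitOn with a single-char separator is List.splitOnP
theorem pv_modifyHead_id {α : Type} (L : List α) : L.modifyHead (fun x => x) = L := by
  cases L <;> rfl

theorem pv_splitOn_go' (c : Char) :
    ∀ (l : List Char) (f : Nat) (cur : List Char) (acc : List (List Char)), l.length < f →
      PySem.Chars.splitOn.go [c] f l cur acc
        = acc.reverse ++ (List.splitOnP (· == c) l).modifyHead (cur.reverse ++ ·) := by
  intro l
  induction l with
  | nil =>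
    intro f cur acc hf
    cases f with
    | zero => omega
    | succ f' => simp [PySem.Chars.splitOn.go, List.splitOnP_nil]
  | cons x t ih =>
    intro f cur acc hf
    cases f with
    | zero => omega
    | succ f' =>
      by_cases hx : x = c
      · subst hx
        rw [show PySem.Chars.splitOn.go [x] (f' + 1) (x :: t) cur acc
              = PySem.Chars.splitOn.go [x] f' t [] (cur.reverse :: acc) by
            simp [PySem.Chars.splitOn.go, List.isPrefixOf]]
        rw [ih f' [] (cur.reverse :: acc) (by simp at hf; omega)]
        simp [List.splitOnP_cons, pv_modifyHead_id]
      · rw [show PySem.Chars.splitOn.go [c] (f' + 1) (x :: t) cur acc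
              = PySem.Chars.splitOn.go [c] f' t (x :: cur) acc by
            simp [PySem.Chars.splitOn.go, List.isPrefixOf, Ne.symm hx]]
        rw [ih f' (x :: cur) acc (by simp at hf; omega)]
        have hx' : (x == c) = false := beq_eq_false_iff_ne.mpr hx
        rw [List.splitOnP_cons]
        simp only [hx', Bool.false_eq_true, if_false]
        rcases hsp : List.splitOnP (· == c) t with _ | ⟨h0, t0⟩
        · exact absurd hsp (List.splitOnP_ne_nil _ t)
        · simp

theorem pv_splitOn_single (s : List Char) (c : Char) :
    PySem.Chars.splitOn s [c] = List.splitOnP (· == c) s := by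
  have h := pv_splitOn_go' c s (s.length + 1) [] [] (by omega)
  rw [PySem.Chars.splitOn] at *
  rw [h]
  rcases hsp : List.splitOnP (· == c) s with _ | ⟨h0, t0⟩
  · exact absurd hsp (List.splitOnP_ne_nil _ s)
  · simp

-- split(':', 1) when ':' occurs: exactly the part before and after the first colon
theorem pv_goMax_zero (f : Nat) (l cur : List Char) (acc : List (List Char)) :
    PySem.Chars.splitOnMax.go [':'] f 0 l cur acc = ((cur.reverse ++ l) :: acc).reverse := by
  cases f with
  | zero => simp [PySem.Chars.splitOnMax.go]
  | succ f' =>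
    cases l with
    | nil => simp [PySem.Chars.splitOnMax.go]
    | cons x t => simp [PySem.Chars.splitOnMax.go]

theorem pv_goMax_one :
    ∀ (l : List Char) (f : Nat) (cur : List Char) (acc : List (List Char)), l.length < f → ':' ∈ l →
      PySem.Chars.splitOnMax.go [':'] f 1 l cur acc
        = acc.reverse ++ [cur.reverse ++ l.takeWhile (· != ':'), (l.dropWhile (· != ':')).tail] := by
  intro l
  induction l with
  | nil => intro f cur acc _ hm; simp at hm
  | cons x t ih =>
    intro f cur acc hf hm
    cases f with
    | zero => omega
    | succ f' =>
      by_cases hx : x = ':'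
      · subst hx
        rw [show PySem.Chars.splitOnMax.go [':'] (f' + 1) 1 (':' :: t) cur acc
              = PySem.Chars.splitOnMax.go [':'] f' 0 t [] (cur.reverse :: acc) by
            simp [PySem.Chars.splitOnMax.go, List.isPrefixOf]]
        rw [pv_goMax_zero]
        simp
      · have hm' : ':' ∈ t := by
          cases hm with
          | head => exact absurd rfl hx
          | tail _ h => exact h
        rw [show PySem.Chars.splitOnMax.go [':'] (f' + 1) 1 (x :: t) cur acc
              = PySem.Chars.splitOnMax.go [':'] f' 1 t (x :: cur) acc by
            simp [PySem.Chars.splitOnMax.go, List.isPrefixOf, Ne.symm hx]]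
        rw [ih f' (x :: cur) acc (by simp at hf; omega) hm']
        simp [hx]

theorem pv_splitColon (e : List Char) (h : ':' ∈ e) :
    PySem.Chars.splitOnMax e [':'] 1
      = [e.takeWhile (· != ':'), (e.dropWhile (· != ':')).tail] := by
  rw [PySem.Chars.splitOnMax]
  rw [if_neg (by omega)]
  have := pv_goMax_one e (e.length + 1) [] [] (by omega) h
  simpa using this

-- strip facts
theorem pv_dropWhile_nil_of_all {p : Char → Bool} {w : List Char} (hw : ∀ c ∈ w, p c = true) :
    List.dropWhile p w = [] := List.dropWhile_eq_nil_iff.mpr hw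

theorem pv_lstrip_append (w x : List Char) (hw : ∀ c ∈ w, PySem.Chars.isspace c = true) :
    PySem.Chars.lstrip (w ++ x) = PySem.Chars.lstrip x := by
  simp [PySem.Chars.lstrip, List.dropWhile_append, pv_dropWhile_nil_of_all hw]

theorem pv_strip_append_left (w x : List Char) (hw : ∀ c ∈ w, PySem.Chars.isspace c = true) :
    PySem.Chars.strip (w ++ x) = PySem.Chars.strip x := by
  simp [PySem.Chars.strip, pv_lstrip_append w x hw]

theorem pv_strip_decomp (l : List Char) :
    ∃ w1 w2, (∀ c ∈ w1, PySem.Chars.isspace c = true) ∧ (∀ c ∈ w2, PySem.Chars.isspace c = true) ∧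
      l = w1 ++ PySem.Chars.strip l ++ w2 := by
  refine ⟨List.takeWhile PySem.Chars.isspace l,
          (List.takeWhile PySem.Chars.isspace (PySem.Chars.lstrip l).reverse).reverse, ?_, ?_, ?_⟩
  · intro c hc; exact List.mem_takeWhile_imp hc
  · intro c hc; exact List.mem_takeWhile_imp (by simpa using hc)
  · conv_lhs => rw [← List.takeWhile_append_dropWhile (p := PySem.Chars.isspace) (l := l)]
    rw [List.append_assoc]
    congr 1
    show PySem.Chars.lstrip l = _
    conv_lhs => rw [← List.reverse_reverse (PySem.Chars.lstrip l)]
    conv_lhs => rw [← List.takeWhile_append_dropWhile (p := PySem.Chars.isspace)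
                      (l := (PySem.Chars.lstrip l).reverse)]
    rw [List.reverse_append]
    rfl

-- takeWhile facts for the colon predicate
theorem pv_takeWhile_all {p : Char → Bool} {w : List Char} (hw : ∀ c ∈ w, p c = true) :
    List.takeWhile p w = w := List.takeWhile_eq_self_iff.mpr hw

theorem pv_takeWhile_append_all {p : Char → Bool} (w e : List Char) (hw : ∀ c ∈ w, p c = true) :
    List.takeWhile p (w ++ e) = w ++ List.takeWhile p e := by
  rw [List.takeWhile_append, if_pos (by rw [pv_takeWhile_all hw])]

theorem pv_takeWhile_append_stop {p : Char → Bool} (e w : List Char) (c : Char)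
    (hc : c ∈ e) (hpc : p c = false) :
    List.takeWhile p (e ++ w) = List.takeWhile p e := by
  rw [List.takeWhile_append, if_neg]
  intro hlen
  have : List.takeWhile p e = e := (List.takeWhile_prefix p).eq_of_length hlen
  have := List.takeWhile_eq_self_iff.mp this c hc
  rw [hpc] at this
  exact absurd this (by simp)

-- pvEntryOut ignores surrounding whitespace
theorem pv_entryOut_left (w e : List Char) (hw : ∀ c ∈ w, PySem.Chars.isspace c = true) :
    pvEntryOut (w ++ e) = pvEntryOut e := by
  have hcw : ':' ∉ w := fun h => by
    have := hw ':' h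
    simp [PySem.Chars.isspace] at this
  by_cases he : ':' ∈ e
  · rw [pvEntryOut, pvEntryOut, if_pos (by simp [he]), if_pos he]
    rw [pv_takeWhile_append_all w e (by intro c hc; simp; rintro rfl; exact hcw hc)]
    rw [pv_strip_append_left w _ hw]
  · rw [pvEntryOut, pvEntryOut, if_neg (by simp [he, hcw]), if_neg he]

theorem pv_entryOut_right (e w : List Char) (hw : ∀ c ∈ w, PySem.Chars.isspace c = true) :
    pvEntryOut (e ++ w) = pvEntryOut e := by
  have hcw : ':' ∉ w := fun h => by
    have := hw ':' h
    simp [PySem.Chars.isspace] at this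
  by_cases he : ':' ∈ e
  · rw [pvEntryOut, pvEntryOut, if_pos (by simp [he]), if_pos he]
    rw [pv_takeWhile_append_stop e w ':' he (by simp)]
  · rw [pvEntryOut, pvEntryOut, if_neg (by simp [he, hcw]), if_neg he]

-- pvEntryOut is invariant under strip
theorem pv_entryOut_strip (e : List Char) : pvEntryOut (PySem.Chars.strip e) = pvEntryOut e := by
  obtain ⟨w1, w2, h1, h2, hd⟩ := pv_strip_decomp e
  conv_rhs => rw [hd, List.append_assoc]
  rw [pv_entryOut_left w1 _ h1, pv_entryOut_right _ w2 h2]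

-- splitOnP over surrounding pieces
theorem pv_splitOnP_append_left {p : Char → Bool} (w l : List Char) (hw : ∀ c ∈ w, p c = false) :
    List.splitOnP p (w ++ l) = (List.splitOnP p l).modifyHead (w ++ ·) := by
  induction w with
  | nil =>
    rcases hsp : List.splitOnP p l with _ | ⟨h0, t0⟩
    · exact absurd hsp (List.splitOnP_ne_nil _ l)
    · rw [List.nil_append, hsp]; simp
  | cons a w ih =>
    rw [List.cons_append, List.splitOnP_cons, if_neg (by simp [hw a (by simp)])]
    rw [ih (by intro c hc; exact hw c (by simp [hc]))]
    rcases hsp : List.splitOnP p l with _ | ⟨h0, t0⟩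
    · exact absurd hsp (List.splitOnP_ne_nil _ l)
    · simp

theorem pv_splitOnP_append_right {p : Char → Bool} (l w : List Char) (hw : ∀ c ∈ w, p c = false) :
    List.splitOnP p (l ++ w) = pvModLast (· ++ w) (List.splitOnP p l) := by
  induction l with
  | nil =>
    rw [List.nil_append, List.splitOnP_nil,
        List.splitOnP_eq_single p w (by intro x hx; simp [hw x hx])]
    rfl
  | cons a l ih =>
    rw [List.cons_append, List.splitOnP_cons, List.splitOnP_cons]
    by_cases ha : p a
    · rw [if_pos ha, if_pos ha, ih]
      rw [pvModLast_cons _ _ _ (List.splitOnP_ne_nil _ l)]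
    · rw [if_neg ha, if_neg ha, ih]
      rcases hsp : List.splitOnP p l with _ | ⟨h0, t0⟩
      · exact absurd hsp (List.splitOnP_ne_nil _ l)
      · cases t0 with
        | nil => simp [pvModLast]
        | cons y t =>
          rw [pvModLast_cons (fun x => x ++ w) h0 (y :: t) (List.cons_ne_nil y t), List.modifyHead_cons,
              List.modifyHead_cons, pvModLast_cons (fun x => x ++ w) (a :: h0) (y :: t) (List.cons_ne_nil y t)]

theorem pv_flatMap_modifyHead (w : List Char) (L : List (List Char)) (hL : L ≠ [])
    (hw : ∀ c ∈ w, PySem.Chars.isspace c = true) :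
    (L.modifyHead (w ++ ·)).flatMap pvEntryOut = L.flatMap pvEntryOut := by
  cases L with
  | nil => exact absurd rfl hL
  | cons h t => simp [pv_entryOut_left w h hw]

theorem pv_flatMap_pvModLast (w : List Char) (L : List (List Char))
    (hw : ∀ c ∈ w, PySem.Chars.isspace c = true) :
    (pvModLast (· ++ w) L).flatMap pvEntryOut = L.flatMap pvEntryOut := by
  induction L with
  | nil => rfl
  | cons h t ih =>
    cases t with
    | nil => simp [pvModLast, pv_entryOut_right h w hw]
    | cons y tt =>
      rw [pvModLast_cons _ _ _ (List.cons_ne_nil y tt)]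
      simp only [List.flatMap_cons]
      rw [ih]
      simp

-- a line contributes the same as its stripped core
theorem pv_lineOut_strip (l : List Char) : pvLineOut (PySem.Chars.strip l) = pvLineOut l := by
  obtain ⟨w1, w2, h1, h2, hd⟩ := pv_strip_decomp l
  have hw1 : ∀ c ∈ w1, ((c == '.') : Bool) = false := by
    intro c hc
    have := h1 c hc
    simp only [beq_eq_false_iff_ne, ne_eq]
    rintro rfl
    simp [PySem.Chars.isspace] at this
  have hw2 : ∀ c ∈ w2, ((c == '.') : Bool) = false := by
    intro c hc
    have := h2 c hc
    simp only [beq_eq_false_iff_ne, ne_eq]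
    rintro rfl
    simp [PySem.Chars.isspace] at this
  conv_rhs => rw [hd]
  rw [pvLineOut, pvLineOut, List.append_assoc]
  rw [pv_splitOnP_append_left w1 _ hw1]
  rw [pv_splitOnP_append_right _ w2 hw2]
  rw [pv_flatMap_modifyHead w1 _ (pvModLast_ne_nil _ _ (List.splitOnP_ne_nil _ _)) h1]
  rw [pv_flatMap_pvModLast w2 _ h2]

-- the flattening: splitting on '.'-or-'\n' at once = split on '\n' then on '.'
theorem pv_split_merge (s : List Char) :
    List.splitOnP pvDelim s
      = (List.splitOnP (· == '\n') s).flatMap (fun l => List.splitOnP (· == '.') l) := by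
  induction s with
  | nil => simp [List.splitOnP_nil]
  | cons a s ih =>
    rcases hsp : List.splitOnP (· == '\n') s with _ | ⟨h0, t0⟩
    · exact absurd hsp (List.splitOnP_ne_nil _ s)
    · rw [hsp] at ih
      by_cases ha : a = '\n'
      · subst ha
        rw [List.splitOnP_cons, if_pos (by decide), ih]
        rw [List.splitOnP_cons, if_pos (by simp), hsp]
        simp [List.splitOnP_nil]
      · by_cases hd : a = '.'
        · subst hd
          rw [List.splitOnP_cons, if_pos (by decide), ih]
          rw [List.splitOnP_cons, if_neg (by simp), hsp, List.modifyHead_cons]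
          simp only [List.flatMap_cons]
          rw [List.splitOnP_cons, if_pos (by simp)]
          simp
        · rw [List.splitOnP_cons, if_neg (by simp [pvDelim, ha, hd]), ih]
          rw [List.splitOnP_cons, if_neg (by simp [ha]), hsp, List.modifyHead_cons]
          simp only [List.flatMap_cons]
          rw [List.splitOnP_cons, if_neg (by simp [hd])]
          rcases hsp2 : List.splitOnP (· == '.') h0 with _ | ⟨g0, g1⟩
          · exact absurd hsp2 (List.splitOnP_ne_nil _ h0)
          · simp

-- A's per-entry body appends exactly pvEntryOut
theorem pv_A_entry (e : List Char) (skills : List (List Char)) :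
    (let entry := PySem.Chars.strip e
     if PySem.Chars.isIn [':'] entry then
       match PySem.Chars.splitOnMax entry [':'] 1 with
       | [part0, part1] =>
         let softwareName := PySem.Chars.strip part0
         let _level := PySem.Chars.strip part1
         let softwareName := PySem.Chars.replace softwareName "MS-".toList "MS ".toList
         let softwareName := PySem.Chars.replace softwareName "MS ".toList "Microsoft ".toList
         if softwareName ≠ [] ∧ softwareName.length > 1 then skills ++ [softwareName]
         else skills
       | _ => skills
     else skills) = skills ++ pvEntryOut e := by
  rw [← pv_entryOut_strip e]
  generalize PySem.Chars.strip e = e'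
  by_cases he : ':' ∈ e'
  · simp only []
    rw [if_pos (by rw [pv_isIn_single]; simp [he])]
    rw [pv_splitColon e' he]
    rw [pvEntryOut, if_pos he]
    simp only [pvClean]
    generalize (PySem.Chars.replace
        (PySem.Chars.replace (PySem.Chars.strip (e'.takeWhile (· != ':'))) "MS-".toList "MS ".toList)
        "MS ".toList "Microsoft ".toList) = X
    by_cases hlen : 1 < X.length
    · rw [if_pos hlen, if_pos ⟨by intro hnil; rw [hnil] at hlen; simp at hlen, hlen⟩]
    · rw [if_neg hlen, if_neg (by rintro ⟨-, h⟩; exact hlen h)]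
      simp
  · simp only []
    rw [if_neg (by rw [pv_isIn_single]; simp [he])]
    rw [pvEntryOut, if_neg he]
    simp

-- A's per-line body appends exactly pvLineOut
theorem pv_A_line (l : List Char) (skills : List (List Char)) :
    (let line := PySem.Chars.strip l
     if line.isEmpty || line == "SOFTWARE".toList then skills
     else
       (PySem.Chars.splitOn line ['.']).foldl (fun skills entry =>
         let entry := PySem.Chars.strip entry
         if PySem.Chars.isIn [':'] entry then
           match PySem.Chars.splitOnMax entry [':'] 1 with
           | [part0, part1] =>
             let softwareName := PySem.Chars.strip part0
             let _level := PySem.Chars.strip part1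
             let softwareName := PySem.Chars.replace softwareName "MS-".toList "MS ".toList
             let softwareName := PySem.Chars.replace softwareName "MS ".toList "Microsoft ".toList
             if softwareName ≠ [] ∧ softwareName.length > 1 then skills ++ [softwareName]
             else skills
           | _ => skills
         else skills) skills) = skills ++ pvLineOut l := by
  simp only []
  by_cases hskip : (PySem.Chars.strip l).isEmpty || (PySem.Chars.strip l) == "SOFTWARE".toList
  · rw [if_pos hskip]
    rw [← pv_lineOut_strip l]
    rcases Bool.or_eq_true_iff.mp hskip with h | h
    · rw [List.isEmpty_iff.mp h]
      have : pvLineOut [] = [] := by decide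
      simp [this]
    · rw [(beq_iff_eq).mp h]
      have hso : pvLineOut ['S', 'O', 'F', 'T', 'W', 'A', 'R', 'E'] = [] := by decide
      simp [hso]
  · rw [if_neg hskip]
    have hfold : ∀ (entries : List (List Char)) (acc : List (List Char)),
        entries.foldl (fun skills entry =>
          let entry := PySem.Chars.strip entry
          if PySem.Chars.isIn [':'] entry then
            match PySem.Chars.splitOnMax entry [':'] 1 with
            | [part0, part1] =>
              let softwareName := PySem.Chars.strip part0
              let _level := PySem.Chars.strip part1
              let softwareName := PySem.Chars.replace softwareName "MS-".toList "MS ".toList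
              let softwareName := PySem.Chars.replace softwareName "MS ".toList "Microsoft ".toList
              if softwareName ≠ [] ∧ softwareName.length > 1 then skills ++ [softwareName]
              else skills
            | _ => skills
          else skills) acc = acc ++ entries.flatMap pvEntryOut := by
      intro entries
      induction entries with
      | nil => intro acc; simp
      | cons e t ih =>
        intro acc
        rw [List.foldl_cons, List.flatMap_cons, pv_A_entry e acc, ih, List.append_assoc]
    rw [hfold]
    rw [pv_splitOn_single, ← pvLineOut, pv_lineOut_strip]

-- slicing from a valid nonnegative start index is List.drop
theorem pv_clampIdx_eq (n : Nat) (i : Int) (h0 : 0 ≤ i) (hl : i ≤ (n : Int)) :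
    PySem.List.clampIdx n i = i.toNat := by
  simp only [PySem.List.clampIdx]
  rw [if_neg (by omega)]
  omega

theorem pv_slice_from (xs : List Char) (i : Int) (h0 : 0 ≤ i) (hl : i ≤ (xs.length : Int)) :
    PySem.List.slice xs (some i) none = xs.drop i.toNat := by
  simp only [PySem.List.slice, pv_clampIdx_eq xs.length i h0 hl]
  exact List.take_of_length_le (by simp)

theorem pv_slice_from_len (xs : List Char) (i : Int) (h0 : 0 ≤ i) (hl : i ≤ (xs.length : Int)) :
    PySem.List.slice xs (some i) (some ((xs.length : Int))) = xs.drop i.toNat := by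
  simp only [PySem.List.slice, pv_clampIdx_eq xs.length i h0 hl,
    pv_clampIdx_eq xs.length (xs.length : Int) (by omega) (by omega), Int.toNat_natCast]
  exact List.take_of_length_le (by simp)

-- A's fold over the lines appends the concatenation of the per-line outputs
theorem pv_A_fold (lines : List (List Char)) (acc : List (List Char)) :
    lines.foldl (fun skills line =>
      let line := PySem.Chars.strip line
      if line.isEmpty || line == "SOFTWARE".toList then skills
      else
        (PySem.Chars.splitOn line ['.']).foldl (fun skills entry =>
          let entry := PySem.Chars.strip entry
          if PySem.Chars.isIn [':'] entry then
            match PySem.Chars.splitOnMax entry [':'] 1 with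
            | [part0, part1] =>
              let softwareName := PySem.Chars.strip part0
              let _level := PySem.Chars.strip part1
              let softwareName := PySem.Chars.replace softwareName "MS-".toList "MS ".toList
              let softwareName := PySem.Chars.replace softwareName "MS ".toList "Microsoft ".toList
              if softwareName ≠ [] ∧ softwareName.length > 1 then skills ++ [softwareName]
              else skills
            | _ => skills
          else skills) skills) acc
      = acc ++ lines.flatMap pvLineOut := by
  induction lines generalizing acc with
  | nil => simp
  | cons l t ih =>
    rw [List.foldl_cons, List.flatMap_cons, pv_A_line l acc, ih, List.append_assoc]

-- pvSegOut equations used by the scan invariant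
theorem pv_segOut_flag (buf : List Char) (c : Char) (e : List Char) :
    pvSegOut buf true (c :: e) = pvSegOut buf true e := rfl

theorem pv_segOut_colon (buf : List Char) (e : List Char) :
    pvSegOut buf false (':' :: e) = pvSegOut buf true e := by
  rw [pvSegOut, pvSegOut, if_neg (by simp), if_pos (by simp)]
  simp

theorem pv_segOut_push (buf : List Char) (c : Char) (e : List Char) (hc : c ≠ ':') :
    pvSegOut buf false (c :: e) = pvSegOut (buf ++ [c]) false e := by
  have hmem : (':' ∈ c :: e) ↔ (':' ∈ e) := by simp [Ne.symm hc]
  rw [pvSegOut, pvSegOut]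
  simp only [Bool.false_eq_true, if_false]
  by_cases he : ':' ∈ e
  · rw [if_pos (hmem.mpr he), if_pos he]
    rw [List.takeWhile_cons, if_pos (by simp [hc])]
    simp only [List.append_assoc, List.singleton_append]
  · rw [if_neg (fun h => he (hmem.mp h)), if_neg he]

theorem pv_segOut_nil (e : List Char) : pvSegOut [] false e = pvEntryOut e := by
  rw [pvSegOut, pvEntryOut, if_neg (by simp)]
  by_cases he : ':' ∈ e
  · rw [if_pos he, if_pos he]
    simp [pvEmit]
  · rw [if_neg he, if_neg he]

-- on a flush, B's step body emits pvEmit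
theorem pv_stepB_delim (skills : List (List Char)) (buf : List Char) (flag : Bool) (c : Char)
    (hc : pvDelim c = true) :
    pvStepB (skills, buf, flag) c = (skills ++ (if flag then pvEmit buf else []), [], false) := by
  rw [pvStepB]
  simp only [pvDelim] at hc
  rw [if_pos hc]
  cases flag
  · simp
  · simp only [if_true, pvEmit, pvClean]

-- the scan invariant: running B's machine over s ++ ['\n'] appends the flattened entry outputs
theorem pv_B_scan (s : List Char) :
    ∀ (acc : List (List Char)) (buf : List Char) (flag : Bool),
      (s ++ ['\n']).foldl pvStepB (acc, buf, flag)
        = (acc ++ pvSegOut buf flag ((List.splitOnP pvDelim s).headI)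
              ++ ((List.splitOnP pvDelim s).tail).flatMap pvEntryOut, [], false) := by
  induction s with
  | nil =>
    intro acc buf flag
    rw [List.nil_append, List.foldl_cons, List.foldl_nil,
        pv_stepB_delim acc buf flag '\n' (by decide), List.splitOnP_nil]
    cases flag <;> simp [pvSegOut]
  | cons c t ih =>
    intro acc buf flag
    rw [List.cons_append, List.foldl_cons]
    by_cases hc : pvDelim c = true
    · rw [pv_stepB_delim acc buf flag c hc, ih, List.splitOnP_cons, if_pos hc]
      rcases hsp : List.splitOnP pvDelim t with _ | ⟨h0, t0⟩
      · exact absurd hsp (List.splitOnP_ne_nil _ t)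
      · simp only [List.headI, List.tail, List.flatMap_cons]
        rw [pv_segOut_nil, pvSegOut]
        cases flag <;> simp
    · have hcd : ¬(c == '.' || c == '\n') = true := by simpa [pvDelim] using hc
      rw [List.splitOnP_cons, if_neg hc]
      rcases hsp : List.splitOnP pvDelim t with _ | ⟨h0, t0⟩
      · exact absurd hsp (List.splitOnP_ne_nil _ t)
      · rw [List.modifyHead_cons]
        simp only [List.headI, List.tail]
        cases flag with
        | true =>
          rw [show pvStepB (acc, buf, true) c = (acc, buf, true) by
                rw [pvStepB]; rw [if_neg hcd]; simp]
          rw [ih, hsp]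
          simp only [List.headI, List.tail]
          rw [pv_segOut_flag]
        | false =>
          by_cases hcol : c = ':'
          · subst hcol
            rw [show pvStepB (acc, buf, false) ':' = (acc, buf, true) by
                  rw [pvStepB]; rw [if_neg hcd]; simp]
            rw [ih, hsp]
            simp only [List.headI, List.tail]
            rw [pv_segOut_colon]
          · rw [show pvStepB (acc, buf, false) c = (acc, buf ++ [c], false) by
                  rw [pvStepB]; rw [if_neg hcd]; simp [hcol]]
            rw [ih, hsp]
            simp only [List.headI, List.tail]
            rw [pv_segOut_push buf c h0 hcol]

-- B's whole scan = the flattened entry outputs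
theorem pv_B_result (s : List Char) :
    ((s ++ ['\n']).foldl pvStepB ([], [], false)).1
      = (List.splitOnP pvDelim s).flatMap pvEntryOut := by
  rw [pv_B_scan s [] [] false]
  rcases hsp : List.splitOnP pvDelim s with _ | ⟨h0, t0⟩
  · exact absurd hsp (List.splitOnP_ne_nil _ s)
  · simp only [List.headI, List.tail, List.flatMap_cons, List.nil_append]
    rw [pv_segOut_nil]

-- ===== VERDICT =====
theorem parse_software_skills_direct_py_spec : Claim_equal_parse_software_skills_direct_py := by
  intro text _
  unfold Spec_parse_software_skills_direct_py
  unfold parse_software_skills_direct_py parse_software_skills_direct_py_alt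
  simp only []
  by_cases hfind : PySem.Chars.find text.toList "SOFTWARE".toList = -1
  · have hbne : (PySem.Chars.find text.toList "SOFTWARE".toList != -1) = false := by
      rw [bne_eq_false_iff_eq]; exact hfind
    have hbeq : (PySem.Chars.find text.toList "SOFTWARE".toList == -1) = true :=
      beq_iff_eq.mpr hfind
    rw [hbne, hbeq]
    simp
  · have hbne : (PySem.Chars.find text.toList "SOFTWARE".toList != -1) = true :=
      bne_iff_ne.mpr hfind
    have hbeq : (PySem.Chars.find text.toList "SOFTWARE".toList == -1) = false :=
      beq_eq_false_iff_ne.mpr hfind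
    rw [hbne, hbeq]
    simp only [if_true, Bool.false_eq_true, if_false]
    have h0 : 0 ≤ PySem.Chars.find text.toList "SOFTWARE".toList := by
      have := PySem.Chars.neg_one_le_find text.toList "SOFTWARE".toList
      omega
    have hl : PySem.Chars.find text.toList "SOFTWARE".toList ≤ (text.toList.length : Int) :=
      PySem.Chars.find_le_length _ _
    rw [PySem.Chars.len, PySem.Chars.slice_eq_listSlice, PySem.Chars.slice_eq_listSlice]
    rw [pv_slice_from _ _ h0 hl, pv_slice_from_len _ _ h0 hl]
    rw [pv_A_fold, pv_B_result]
    rw [pv_splitOn_single, pv_split_merge]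
    simp only [List.nil_append]
    rw [List.flatMap_assoc]
    rfl
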